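-- pv_equiv track=rewrite | github.com/mirageoasis/ndbCoding | boj/1802.py | find
-- ===== SOURCE A (Python) =====
-- def find(string):
--     if len(string) == 1:
--         return True
--     mid=len(string)//2
--
--     for i in range(1, mid+1):
--         left=string[mid-i]
--         right=string[mid+i]
--         if left == right:
--             return False
--     else:
--         return find(string[:mid]) and find(string[mid+1:])
-- ===== SOURCE B (Python) =====
-- def find(string):
--     level = [string]
--     while level:
--         nxt = []
--         for block in level:
--             mid = len(block) // 2
--             left, right = block[:mid], block[mid + 1:]
--             if any(a == b for a, b in zip(reversed(left), right)):
--                 return False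
--             if len(block) > 1:
--                 nxt.append(left)
--                 nxt.append(right)
--         level = nxt
--     return True
-- ===== Notes on version B (the rewrite author's own statement) =====
-- stated objective: alternative
-- what changed: A's short-circuit recursion on the two halves is replaced by an iterative breadth-first sweep over the centered blocks, each block's mirror pairs scanned via zip(reversed(left), right) -- no recursion and no unsafe indexing, so B only raises nowhere and Pre_ (which admits exactly the inputs where A returns) excludes nothing A returns on.
import Mathlib
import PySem

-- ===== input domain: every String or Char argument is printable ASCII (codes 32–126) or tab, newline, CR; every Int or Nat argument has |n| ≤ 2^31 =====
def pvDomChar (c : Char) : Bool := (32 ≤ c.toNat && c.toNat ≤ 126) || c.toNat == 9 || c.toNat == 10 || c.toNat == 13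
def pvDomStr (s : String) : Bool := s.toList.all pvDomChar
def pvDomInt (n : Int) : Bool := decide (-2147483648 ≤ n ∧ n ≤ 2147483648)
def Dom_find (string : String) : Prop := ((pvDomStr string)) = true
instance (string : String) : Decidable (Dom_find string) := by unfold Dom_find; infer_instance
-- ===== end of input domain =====

-- B replaces A's short-circuit half-and-half recursion by an iterative breadth-first sweep over
-- the centered blocks, scanning each block's mirror pairs with zip(reversed(left), right)
-- (alternative decomposition, same cost; B also returns where A raises, outside Pre_find).

-- ===== PORT A =====
-- the 'for i in range(1, mid+1)' scan: some false = Python's 'return False'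
-- (also used, arbitrarily valued, where Python's string[mid+i] raises IndexError — outside Pre_),
-- none = loop completed
def findLoop (s : List Char) (mid : Int) : List Int → Option Bool
  | [] => none
  | i :: rest =>
    match PySem.List.pyGet? s (mid - i), PySem.List.pyGet? s (mid + i) with
    | some left, some right =>
        if left == right then some false else findLoop s mid rest
    | _, _ => some false   -- Python raises IndexError here (outside Pre_)

-- fuel makes A's self-recursion total; fuel length+1 is never exhausted except on the
-- empty string, where Python recurses forever (outside Pre_)
def findAux : Nat → List Char → Bool
  | 0, _ => true
  | fuel + 1, s =>
    if s.length = 1 then true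
    else
      let mid : Nat := s.length / 2
      match findLoop s (mid : Int) (PySem.List.pyRange 1 ((mid : Int) + 1) 1) with
      | some b => b
      | none =>
          findAux fuel (PySem.List.slice s none (some (mid : Int))) &&
          findAux fuel (PySem.List.slice s (some ((mid + 1 : Nat) : Int)) none)

def find (string : String) : Bool := findAux (string.toList.length + 1) string.toList

-- ===== PORT B =====
-- one pass of Source B's inner 'for block in level' loop: processes the blocks in order,
-- 'none' = Python's 'return False', 'some nxt' = the accumulated next level
def altStep : List (List Char) → List (List Char) → Option (List (List Char))
  | [], acc => some acc
  | b :: rest, acc =>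
    let mid := b.length / 2
    let left := b.take mid
    let right := b.drop (mid + 1)
    if (left.reverse.zip right).any (fun p => p.1 == p.2) then none
    else altStep rest (if 1 < b.length then acc ++ [left, right] else acc)

-- the 'while level' loop; the fuel only makes it total for Lean (each level's blocks are
-- strictly shorter than the previous level's, so fuel length+1 is never exhausted)
def altLevels : Nat → List (List Char) → Bool
  | 0, lv => lv.isEmpty
  | fuel + 1, lv =>
    if lv.isEmpty then true
    else
      match altStep lv [] with
      | none => false
      | some nxt => altLevels fuel nxt

def find_alt (string : String) : Bool := altLevels (string.toList.length + 1) [string.toList]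

-- ===== PRECONDITION & SPEC =====
-- Pre_find holds exactly where the Python A RETURNS (it excludes only inputs on which A raises
-- IndexError or RecursionError, none on which A returns): A's traversal scans the left-spine
-- blocks, of lengths (n+1)/2^d - 1, until it either finds a matching mirror pair (returns False),
-- runs every scan cleanly on a length-2^k-1 string (returns a value), or walks off the end of an
-- even-length block (IndexError) — the empty string recurses forever (RecursionError).
def Pre_find (string : String) : Prop :=
  1 ≤ string.toList.length ∧
  ((∃ k, k ≤ string.toList.length ∧ string.toList.length + 1 = 2 ^ k) ∨
   (∃ d, d ≤ string.toList.length ∧ 2 ^ d ∣ (string.toList.length + 1) ∧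
     ∃ i, i ≤ ((string.toList.length + 1) / 2 ^ d - 1 - 1) / 2 ∧ 1 ≤ i ∧
       string.toList[((string.toList.length + 1) / 2 ^ d - 1) / 2 - i]? =
       string.toList[((string.toList.length + 1) / 2 ^ d - 1) / 2 + i]?))
instance (string : String) : Decidable (Pre_find string) := by unfold Pre_find; infer_instance

def pvWitness_find : String := "aba"

def Spec_find (string : String) (out : Bool) : Prop := out = find_alt string
instance (string : String) (out : Bool) : Decidable (Spec_find string out) := by unfold Spec_find; infer_instance

-- ===== CLAIM (what is proved, stated in full; the proofs are below) =====
def Claim_equal_find : Prop := ∀ (string : String), Dom_find string → Pre_find string → Spec_find string (find string)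

-- ===== LEMMAS AND PROOFS =====

-- Source B's mirror scan of one block, as a named function of the block
def scanB (b : List Char) : Bool :=
  ((b.take (b.length / 2)).reverse.zip (b.drop (b.length / 2 + 1))).any (fun p => p.1 == p.2)

-- the children a block contributes to the next level
def childB (b : List Char) : List (List Char) :=
  if 1 < b.length then [b.take (b.length / 2), b.drop (b.length / 2 + 1)] else []

-- reference semantics of B: no mirror match anywhere in the block's tree
def clean (b : List Char) : Bool :=
  if _h : 1 < b.length then
    !scanB b && (clean (b.take (b.length / 2)) && clean (b.drop (b.length / 2 + 1)))
  else !scanB b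
  termination_by b.length
  decreasing_by
    · simp only [List.length_take]; omega
    · simp only [List.length_drop]; omega

-- reference semantics of A (well-founded recursion on length)
def gfind (s : List Char) : Bool :=
  if _h : s.length ≤ 1 then true
  else
    let mid : Nat := s.length / 2
    match findLoop s (mid : Int) (PySem.List.pyRange 1 ((mid : Int) + 1) 1) with
    | some b => b
    | none =>
        gfind (PySem.List.slice s none (some (mid : Int))) &&
        gfind (PySem.List.slice s (some ((mid + 1 : Nat) : Int)) none)
  termination_by s.length
  decreasing_by
    · simp only [PySem.List.slice_to_natCast, List.length_take]; omega
    · simp only [PySem.List.slice_from_natCast, List.length_drop]; omega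

theorem gfind_unfold (s : List Char) (h1 : ¬ s.length ≤ 1) :
    gfind s = match findLoop s ((s.length / 2 : Nat) : Int)
        (PySem.List.pyRange 1 (((s.length / 2 : Nat) : Int) + 1) 1) with
      | some b => b
      | none => gfind (s.take (s.length / 2)) && gfind (s.drop (s.length / 2 + 1)) := by
  rw [gfind, dif_neg h1]
  simp only [PySem.List.slice_to_natCast, PySem.List.slice_from_natCast]

theorem findAux_unfold (n : Nat) (s : List Char) (h1 : s.length ≠ 1) :
    findAux (n+1) s = match findLoop s ((s.length / 2 : Nat) : Int)
        (PySem.List.pyRange 1 (((s.length / 2 : Nat) : Int) + 1) 1) with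
      | some b => b
      | none => findAux n (s.take (s.length / 2)) && findAux n (s.drop (s.length / 2 + 1)) := by
  rw [findAux, if_neg h1]
  simp only [PySem.List.slice_to_natCast, PySem.List.slice_from_natCast]

theorem findLoop_some (s : List Char) (mid : Int) (l : List Int) (b : Bool)
    (h : findLoop s mid l = some b) : b = false := by
  induction l with
  | nil => simp [findLoop] at h
  | cons i rest ih =>
    rcases hg1 : PySem.List.pyGet? s (mid - i) with _ | left <;>
      rcases hg2 : PySem.List.pyGet? s (mid + i) with _ | right <;>
      simp only [findLoop, hg1, hg2, Option.some.injEq] at h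
    all_goals first
      | exact h.symm
      | (split at h
         · simp only [Option.some.injEq] at h
           exact h.symm
         · exact ih h)

theorem findAux_nil (fuel : Nat) : findAux fuel [] = true := by
  induction fuel with
  | zero => rfl
  | succ n ih =>
    rw [findAux_unfold n [] (by simp)]
    simp [PySem.List.pyRange_one_eq_nil, findLoop, ih]

theorem findAux_eq_gfind (fuel : Nat) : ∀ (s : List Char), s.length < fuel →
    findAux fuel s = gfind s := by
  induction fuel with
  | zero => intro s h; omega
  | succ n ih =>
    intro s hlen
    by_cases hnil : s = []
    · subst hnil
      rw [findAux_nil, gfind]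
      simp
    by_cases h1 : s.length = 1
    · rw [gfind, dif_pos (by omega)]
      rw [findAux, if_pos h1]
    · have h2 : 2 ≤ s.length := by
        have := List.length_pos_iff.mpr hnil; omega
      rw [findAux_unfold n s h1, gfind_unfold s (by omega)]
      rcases hscan : findLoop s ((s.length / 2 : Nat) : Int)
          (PySem.List.pyRange 1 (((s.length / 2 : Nat) : Int) + 1) 1) with _ | b
      · simp only
        rw [ih _ (by simp only [List.length_take]; omega),
            ih _ (by simp only [List.length_drop]; omega)]
      · simp only

-- ---- characterizations of the scans ----

-- a mirror match of the top block of t, stated over indices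
def hasMatch (t : List Char) : Prop :=
  ∃ i, i ≤ (t.length - 1) / 2 ∧ 1 ≤ i ∧ t[t.length / 2 - i]? = t[t.length / 2 + i]?

theorem scanB_iff (t : List Char) : scanB t = true ↔ hasMatch t := by
  unfold scanB hasMatch
  rw [List.any_eq_true]
  have hlen : ((t.take (t.length/2)).reverse.zip (t.drop (t.length/2+1))).length = (t.length - 1) / 2 := by
    simp only [List.length_zip, List.length_reverse, List.length_take, List.length_drop]
    omega
  constructor
  · rintro ⟨p, hp, hpq⟩
    rcases List.mem_iff_getElem.mp hp with ⟨j, hj, rfl⟩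
    rw [hlen] at hj
    refine ⟨j + 1, by omega, by omega, ?_⟩
    have hj1 : j < ((t.take (t.length/2)).reverse).length := by
      simp only [List.length_reverse, List.length_take]; omega
    have hj2 : j < (t.drop (t.length/2+1)).length := by
      simp only [List.length_drop]; omega
    rw [List.getElem_zip] at hpq
    simp only at hpq
    have e1 : ((t.take (t.length/2)).reverse)[j] = t[t.length/2 - (j+1)] := by
      rw [List.getElem_reverse]
      rw [List.getElem_take]
      congr 1
      simp only [List.length_take]
      omega
    have e2 : (t.drop (t.length/2+1))[j] = t[t.length/2 + (j+1)] := by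
      rw [List.getElem_drop]
      congr 1
      omega
    rw [e1, e2] at hpq
    have hc := beq_iff_eq.mp hpq
    rw [List.getElem?_eq_getElem (by omega), List.getElem?_eq_getElem (by omega), hc]
  · rintro ⟨i, hi2, hi1, heq⟩
    have hn : 3 ≤ t.length := by omega
    have hr1 : t.length/2 - i < t.length := by omega
    have hr2 : t.length/2 + i < t.length := by omega
    rw [List.getElem?_eq_getElem hr1, List.getElem?_eq_getElem hr2, Option.some.injEq] at heq
    have hj : i - 1 < ((t.take (t.length/2)).reverse.zip (t.drop (t.length/2+1))).length := by omega
    refine ⟨_, List.getElem_mem hj, ?_⟩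
    rw [List.getElem_zip]
    simp only
    have hj1 : i - 1 < ((t.take (t.length/2)).reverse).length := by
      simp only [List.length_reverse, List.length_take]; omega
    have e1 : ((t.take (t.length/2)).reverse)[i-1] = t[t.length/2 - i] := by
      rw [List.getElem_reverse, List.getElem_take]
      congr 1
      simp only [List.length_take]
      omega
    have hj2 : i - 1 < (t.drop (t.length/2+1)).length := by
      simp only [List.length_drop]; omega
    have e2 : (t.drop (t.length/2+1))[i-1] = t[t.length/2 + i] := by
      rw [List.getElem_drop]
      congr 1
      omega
    rw [e1, e2, heq, beq_self_eq_true]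

theorem scanB_short (t : List Char) (h : t.length ≤ 1) : scanB t = false := by
  have : t.length / 2 = 0 := by omega
  simp [scanB, this]

theorem clean_short (t : List Char) (h : t.length ≤ 1) : clean t = true := by
  rw [clean, dif_neg (by omega), scanB_short t h]; rfl

theorem clean_false_of_scan (t : List Char) (h : scanB t = true) : clean t = false := by
  rw [clean]; split <;> simp [h]

-- A's scan step by step: 'none' ⟺ every compared pair was in range and unequal
theorem findLoop_none_iff (s : List Char) (mid : Int) (l : List Int) :
    findLoop s mid l = none ↔ ∀ i ∈ l, ∃ a b, PySem.List.pyGet? s (mid - i) = some a ∧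
      PySem.List.pyGet? s (mid + i) = some b ∧ ¬(a == b) := by
  induction l with
  | nil => simp [findLoop]
  | cons i rest ih =>
    rcases hg1 : PySem.List.pyGet? s (mid - i) with _ | a <;>
      rcases hg2 : PySem.List.pyGet? s (mid + i) with _ | b
    · simp [findLoop, hg1, hg2]
    · simp [findLoop, hg1, hg2]
    · simp [findLoop, hg1, hg2]
    · simp only [findLoop, hg1, hg2]
      by_cases hab : a == b
      · rw [if_pos hab]
        simp only [reduceCtorEq, false_iff]
        intro h
        rcases h i (List.mem_cons_self ..) with ⟨a', b', ha', hb', hne⟩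
        rw [hg1, Option.some.injEq] at ha'
        rw [hg2, Option.some.injEq] at hb'
        subst ha'; subst hb'
        exact hne hab
      · rw [if_neg hab, ih]
        constructor
        · intro h i' hi'
          rcases List.mem_cons.mp hi' with rfl | hmem
          · exact ⟨a, b, hg1, hg2, hab⟩
          · exact h i' hmem
        · intro h i' hi'
          exact h i' (List.mem_cons_of_mem _ hi')

-- A's scan on an odd block agrees with B's mirror scan
theorem findLoop_odd (s : List Char) (m : Nat) (h : s.length = 2 * m + 1) :
    findLoop s ((m : Nat) : Int) (PySem.List.pyRange 1 (((m : Nat) : Int) + 1) 1) =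
      if scanB s then some false else none := by
  by_cases hs : scanB s
  · rw [if_pos hs]
    rcases (scanB_iff s).mp hs with ⟨i, hi2, hi1, heq⟩
    rw [h] at hi2 heq
    have hi2' : i ≤ m := by omega
    have hne : findLoop s ((m : Nat) : Int) (PySem.List.pyRange 1 (((m : Nat) : Int) + 1) 1) ≠ none := by
      intro hnone
      rw [findLoop_none_iff] at hnone
      have hall := hnone
      have hmem : (i : Int) ∈ PySem.List.pyRange 1 (((m : Nat) : Int) + 1) 1 := by
        rw [PySem.List.mem_pyRange_one]
        exact ⟨by exact_mod_cast hi1, by omega⟩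
      rcases hall (i : Int) hmem with ⟨a, b, ha, hb, hne⟩
      have e1 : ((m : Int) - (i : Int)) = ((m - i : Nat) : Int) := by omega
      have e2 : ((m : Int) + (i : Int)) = ((m + i : Nat) : Int) := by omega
      rw [e1, PySem.List.pyGet?_natCast] at ha
      rw [e2, PySem.List.pyGet?_natCast] at hb
      have hc : (2 * m + 1) / 2 = m := by omega
      rw [hc] at heq
      rw [heq, hb] at ha
      rw [Option.some.injEq] at ha
      subst ha
      simp at hne
    rcases Option.ne_none_iff_exists'.mp hne with ⟨b, hb⟩
    rw [hb, findLoop_some _ _ _ _ hb]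
  · rw [if_neg hs]
    rw [findLoop_none_iff]
    intro i hi
    rw [PySem.List.mem_pyRange_one] at hi
    have hi' : 1 ≤ i.toNat ∧ i.toNat ≤ m := by omega
    have e1 : ((m : Int) - i) = ((m - i.toNat : Nat) : Int) := by omega
    have e2 : ((m : Int) + i) = ((m + i.toNat : Nat) : Int) := by omega
    rw [e1, e2, PySem.List.pyGet?_natCast, PySem.List.pyGet?_natCast]
    have hr1 : m - i.toNat < s.length := by omega
    have hr2 : m + i.toNat < s.length := by omega
    refine ⟨s[m - i.toNat], s[m + i.toNat], List.getElem?_eq_getElem hr1, List.getElem?_eq_getElem hr2, ?_⟩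
    intro hab
    apply hs
    rw [scanB_iff]
    refine ⟨i.toNat, by omega, by omega, ?_⟩
    have hc : s.length / 2 = m := by omega
    rw [hc, List.getElem?_eq_getElem hr1, List.getElem?_eq_getElem hr2]
    simpa using hab

-- A's scan on an even block never completes (Python raises at i = m unless a match came first);
-- the port returns some false either way
theorem findLoop_even (s : List Char) (m : Nat) (h : s.length = 2 * m) (hm : 1 ≤ m) :
    findLoop s ((m : Nat) : Int) (PySem.List.pyRange 1 (((m : Nat) : Int) + 1) 1) =
      some false := by
  have hne : findLoop s ((m : Nat) : Int) (PySem.List.pyRange 1 (((m : Nat) : Int) + 1) 1) ≠ none := by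
    intro hnone
    rw [findLoop_none_iff] at hnone
    have hall := hnone
    have hmem : (m : Int) ∈ PySem.List.pyRange 1 (((m : Nat) : Int) + 1) 1 := by
      rw [PySem.List.mem_pyRange_one]
      constructor <;> [exact_mod_cast hm; omega]
    rcases hall (m : Int) hmem with ⟨a, b, ha, hb, _⟩
    have e2 : ((m : Int) + (m : Int)) = ((m + m : Nat) : Int) := by omega
    rw [e2, PySem.List.pyGet?_natCast] at hb
    rw [List.getElem?_eq_none (by omega)] at hb
    simp at hb
  rcases Option.ne_none_iff_exists'.mp hne with ⟨b, hb⟩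
  rw [hb, findLoop_some _ _ _ _ hb]

-- ---- the B port computes clean ----

theorem altStep_none (lv acc : List (List Char)) (h : ∃ b ∈ lv, scanB b = true) :
    altStep lv acc = none := by
  induction lv generalizing acc with
  | nil => simp at h
  | cons b rest ih =>
    rcases h with ⟨b', hb', hs⟩
    rcases List.mem_cons.mp hb' with rfl | hmem
    · rw [altStep]
      simp only [scanB] at hs
      rw [if_pos hs]
    · rw [altStep]
      split
      · rfl
      · exact ih _ ⟨b', hmem, hs⟩

theorem altStep_some (lv acc : List (List Char)) (h : ∀ b ∈ lv, scanB b = false) :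
    altStep lv acc = some (acc ++ lv.flatMap childB) := by
  induction lv generalizing acc with
  | nil => simp [altStep]
  | cons b rest ih =>
    have hb := h b (List.mem_cons_self ..)
    rw [altStep]
    simp only [scanB] at hb
    rw [if_neg (by simp [hb])]
    rw [ih _ (fun b' hb' => h b' (List.mem_cons_of_mem _ hb'))]
    simp only [List.flatMap_cons, childB]
    split
    · simp
    · simp

theorem allCongr {α : Type} (l : List α) (p q : α → Bool) (h : ∀ x ∈ l, p x = q x) :
    l.all p = l.all q := by
  induction l with
  | nil => rfl
  | cons a tl ih =>
    simp only [List.all_cons, h a (List.mem_cons_self ..),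
      ih (fun x hx => h x (List.mem_cons_of_mem _ hx))]

theorem clean_unfold_big (b : List Char) (h : 1 < b.length) :
    clean b = (!scanB b && (clean (b.take (b.length / 2)) && clean (b.drop (b.length / 2 + 1)))) := by
  rw [clean, dif_pos h]

theorem altLevels_all_clean (fuel : Nat) : ∀ (lv : List (List Char)),
    (∀ b ∈ lv, b.length < fuel) → altLevels fuel lv = lv.all clean := by
  induction fuel with
  | zero =>
    intro lv h
    cases lv with
    | nil => rfl
    | cons b rest => exact absurd (h b (List.mem_cons_self ..)) (by omega)
  | succ n ih =>
    intro lv h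
    rw [altLevels]
    by_cases hemp : lv.isEmpty
    · rw [if_pos hemp]
      rw [List.isEmpty_iff.mp hemp]
      rfl
    rw [if_neg hemp]
    by_cases hany : ∃ b ∈ lv, scanB b = true
    · rw [altStep_none lv [] hany]
      rcases hany with ⟨b, hb, hs⟩
      have : lv.all clean = false := by
        rw [List.all_eq_false]
        exact ⟨b, hb, by simp [clean_false_of_scan b hs]⟩
      rw [this]
    · have hall : ∀ b ∈ lv, scanB b = false := by
        intro b hb
        rcases Bool.eq_false_or_eq_true (scanB b) with h' | h'
        · exact absurd ⟨b, hb, h'⟩ hany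
        · exact h'
      rw [altStep_some lv [] hall]
      simp only [List.nil_append]
      have hnext : ∀ b' ∈ lv.flatMap childB, b'.length < n := by
        intro b' hb'
        rcases List.mem_flatMap.mp hb' with ⟨b, hb, hb'c⟩
        have hlen := h b hb
        unfold childB at hb'c
        split at hb'c
        · simp only [List.mem_cons, List.not_mem_nil, or_false] at hb'c
          rcases hb'c with rfl | rfl
          · simp only [List.length_take]; omega
          · simp only [List.length_drop]; omega
        · simp at hb'c
      rw [ih _ hnext]
      rw [List.all_flatMap]
      apply allCongr
      intro b hb
      have hs := hall b hb
      unfold childB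
      by_cases hbig : 1 < b.length
      · rw [if_pos hbig, clean_unfold_big b hbig, hs]
        simp
      · rw [if_neg hbig, clean_short b (by omega)]
        rfl

theorem find_alt_eq_clean (string : String) : find_alt string = clean string.toList := by
  rw [find_alt, altLevels_all_clean _ _ (by intro b hb; simp at hb; subst hb; omega)]
  simp

-- ---- the two sides, case pow / case spine ----

theorem gfind_true_pow (t : List Char) (h : gfind t = true) : ∃ k, t.length + 1 = 2 ^ k := by
  generalize hn : t.length = n at *
  induction n using Nat.strong_induction_on generalizing t with
  | _ n ih =>
    by_cases hle : n ≤ 1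
    · interval_cases n
      · exact ⟨0, rfl⟩
      · exact ⟨1, rfl⟩
    · rw [gfind_unfold t (by omega)] at h
      rw [hn] at h
      rcases Nat.even_or_odd n with ⟨m, hm⟩ | ⟨m, hm⟩
      · have hm2 : n / 2 = m := by omega
        rw [hm2, findLoop_even t m (by omega) (by omega)] at h
        simp at h
      · have hm2 : n / 2 = m := by omega
        rw [hm2, findLoop_odd t m (by omega)] at h
        by_cases hs : scanB t
        · rw [if_pos hs] at h; simp at h
        · rw [if_neg hs] at h
          simp only [Bool.and_eq_true] at h
          rcases ih m (by omega) (t.take m) h.1 (by simp only [List.length_take]; omega)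
            with ⟨j, hj⟩
          exact ⟨j + 1, by rw [pow_succ]; omega⟩

theorem gfind_eq_clean_pow_aux : ∀ (n : Nat), ∀ (t : List Char), t.length = n →
    (∃ k, n + 1 = 2 ^ k) → gfind t = clean t := by
  intro n
  induction n using Nat.strong_induction_on with
  | _ n ih =>
    intro t hn h
    rcases h with ⟨k, hk⟩
    by_cases hle : n ≤ 1
    · rw [gfind, dif_pos (by omega), clean_short t (by omega)]
    · have hk2 : 2 ≤ k := by
        rcases Nat.lt_or_ge k 2 with hlt | hge
        · interval_cases k <;> omega
        · exact hge
      have h2k : (2:Nat) ^ k = 2 * 2 ^ (k - 1) := by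
        conv_lhs => rw [show k = (k - 1) + 1 by omega]
        rw [pow_succ']
      have hodd : n = 2 * (n / 2) + 1 := by omega
      rw [gfind_unfold t (by omega), hn]
      rw [findLoop_odd t (n / 2) (by omega)]
      rcases Bool.eq_false_or_eq_true (scanB t) with hs | hs
      · rw [if_pos hs, clean_false_of_scan t hs]
      · rw [if_neg (by simp [hs]), clean_unfold_big t (by omega), hs]
        have hhalf : n / 2 + 1 = 2 ^ (k - 1) := by omega
        rw [hn]
        rw [ih (n / 2) (by omega) (t.take (n / 2))
              (by simp only [List.length_take]; omega) ⟨k - 1, by omega⟩,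
            ih (n / 2) (by omega) (t.drop (n / 2 + 1))
              (by simp only [List.length_drop]; omega) ⟨k - 1, by omega⟩]
        simp

theorem gfind_eq_clean_pow (t : List Char) (h : ∃ k, t.length + 1 = 2 ^ k) :
    gfind t = clean t :=
  gfind_eq_clean_pow_aux t.length t rfl h

-- the depth-d left-spine block
def spine (s : List Char) : Nat → List Char
  | 0 => s
  | d + 1 => spine (s.take (s.length / 2)) d

theorem spine_take (d : Nat) : ∀ (s : List Char), 2 ^ d ∣ (s.length + 1) →
    spine s d = s.take ((s.length + 1) / 2 ^ d - 1) := by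
  induction d with
  | zero => intro s _; simp [spine]
  | succ d ih =>
    intro s hdvd
    rcases hdvd with ⟨q, hq⟩
    have hp : (0:Nat) < 2 ^ d := Nat.two_pow_pos d
    have hps : (2:Nat) ^ (d + 1) = 2 * 2 ^ d := by rw [pow_succ']
    have he : s.length + 1 = 2 * (2 ^ d * q) := by rw [hq, hps]; ring
    have hq0 : 1 ≤ q := by
      rcases Nat.eq_zero_or_pos q with rfl | h
      · omega
      · exact h
    have hql : q ≤ 2 ^ d * q := Nat.le_mul_of_pos_left q hp
    by_cases h0 : s.length = 0
    · omega
    · have hodd : s.length = 2 * (s.length / 2) + 1 := by omega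
      rw [spine]
      have hlen' : (s.take (s.length / 2)).length = s.length / 2 := by
        simp only [List.length_take]; omega
      have hq' : s.length / 2 + 1 = 2 ^ d * q := by omega
      have hdvd' : 2 ^ d ∣ ((s.take (s.length / 2)).length + 1) := by
        rw [hlen']
        exact ⟨q, hq'⟩
      rw [ih _ hdvd', List.take_take, hlen']
      have e1 : (s.length / 2 + 1) / 2 ^ d = q := by
        rw [hq', Nat.mul_div_cancel_left _ hp]
      have e2 : (s.length + 1) / 2 ^ (d + 1) = q := by
        rw [hq, Nat.mul_div_cancel_left _ (Nat.two_pow_pos (d+1))]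
      rw [e1, e2]
      congr 1
      omega

theorem clean_spine_false (d : Nat) : ∀ (s : List Char), 2 ^ d ∣ (s.length + 1) →
    scanB (spine s d) = true → clean s = false := by
  induction d with
  | zero => intro s _ hs; exact clean_false_of_scan s hs
  | succ d ih =>
    intro s hdvd hs
    rcases hdvd with ⟨q, hq⟩
    have hp : (0:Nat) < 2 ^ d := Nat.two_pow_pos d
    have hps : (2:Nat) ^ (d + 1) = 2 * 2 ^ d := by rw [pow_succ']
    have he : s.length + 1 = 2 * (2 ^ d * q) := by rw [hq, hps]; ring
    have hq0 : 1 ≤ q := by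
      rcases Nat.eq_zero_or_pos q with rfl | h
      · omega
      · exact h
    have hql : q ≤ 2 ^ d * q := Nat.le_mul_of_pos_left q hp
    by_cases h0 : s.length = 0
    · omega
    · have hodd : s.length = 2 * (s.length / 2) + 1 := by omega
      rw [spine] at hs
      have hlen' : (s.take (s.length / 2)).length = s.length / 2 := by
        simp only [List.length_take]; omega
      have hclean' : clean (s.take (s.length / 2)) = false := by
        apply ih _ _ hs
        rw [hlen']
        exact ⟨q, by omega⟩
      by_cases hbig : 1 < s.length
      · rw [clean_unfold_big s hbig, hclean']
        simp
      · -- s.length = 1, so the left half is [] and clean [] = true: contradiction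
        exfalso
        have h1 : s.length = 1 := by omega
        have : clean (s.take (s.length / 2)) = true := by
          apply clean_short
          simp only [List.length_take]; omega
        rw [this] at hclean'
        exact Bool.noConfusion hclean'

theorem find_eq (string : String) (hpre : Pre_find string) : find string = find_alt string := by
  rcases hpre with ⟨h1, hpow | hspine⟩
  · rw [find, findAux_eq_gfind _ _ (by omega), find_alt_eq_clean]
    rcases hpow with ⟨k, _, hk⟩
    exact gfind_eq_clean_pow _ ⟨k, hk⟩
  · rcases hspine with ⟨d, hd, hdvd, i, hi2, hi1, heq⟩
    set s := string.toList with hsdef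
    set L := (s.length + 1) / 2 ^ d - 1 with hLdef
    have hLle : L ≤ s.length := by
      have : (s.length + 1) / 2 ^ d ≤ s.length + 1 := Nat.div_le_self _ _
      omega
    have hL3 : 3 ≤ L := by omega
    have hscan : scanB (spine s d) = true := by
      rw [spine_take d s hdvd, scanB_iff]
      have hlen : (s.take L).length = L := by simp only [List.length_take]; omega
      refine ⟨i, by rw [hlen]; omega, hi1, ?_⟩
      rw [hlen]
      rw [List.getElem?_take_of_lt (by omega), List.getElem?_take_of_lt (by omega)]
      exact heq
    have hclean : clean s = false := clean_spine_false d s hdvd hscan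
    have hg : gfind s = false := by
      rcases Bool.eq_false_or_eq_true (gfind s) with hgt | hgt
      · -- gfind = true forces a power-of-two length, where gfind = clean = false: absurd
        rw [gfind_eq_clean_pow s (gfind_true_pow s hgt), hclean] at hgt
        exact Bool.noConfusion hgt
      · exact hgt
    rw [find, findAux_eq_gfind _ _ (by omega), find_alt_eq_clean, hg, hclean]

-- ===== VERDICT (by name: the statement is the Claim_ definition above) =====
theorem find_spec : Claim_equal_find := by
  intro string _ hpre
  unfold Spec_find
  exact find_eq string hpre
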